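-- pv_equiv track=rewrite | github.com/Grimmins/Eau | eau06.py | maj
-- ===== SOURCE A (Python) =====
-- import string
--
-- def maj(ch0):
--     ch1 = ""
--     j = 0
--     for i in range(len(ch0)):
--         if ch0[i] not in string.ascii_letters:
--             ch1 += ch0[i]
--             continue
--         else:
--             if j%2 == 0:
--                 ch1 += ch0[i].upper()
--                 j += 1
--             else:
--                 ch1 += ch0[i]
--                 j += 1
--     return ch1
-- ===== SOURCE B (Python) =====
-- import string
--
-- def maj(ch0):
--     positions = [i for i, c in enumerate(ch0) if c in string.ascii_letters]
--     to_upper = {p for k, p in enumerate(positions) if k % 2 == 0}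
--     return ''.join(c.upper() if i in to_upper else c for i, c in enumerate(ch0))
-- ===== Notes on version B (the rewrite author's own statement) =====
-- stated objective: idiomatic
-- what changed: Replaces the single loop carrying a live parity counter and string concatenation by a precomputed index of letter positions, a set of every other such position, and one join-driven mapping pass selected by set membership.
import Mathlib
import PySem

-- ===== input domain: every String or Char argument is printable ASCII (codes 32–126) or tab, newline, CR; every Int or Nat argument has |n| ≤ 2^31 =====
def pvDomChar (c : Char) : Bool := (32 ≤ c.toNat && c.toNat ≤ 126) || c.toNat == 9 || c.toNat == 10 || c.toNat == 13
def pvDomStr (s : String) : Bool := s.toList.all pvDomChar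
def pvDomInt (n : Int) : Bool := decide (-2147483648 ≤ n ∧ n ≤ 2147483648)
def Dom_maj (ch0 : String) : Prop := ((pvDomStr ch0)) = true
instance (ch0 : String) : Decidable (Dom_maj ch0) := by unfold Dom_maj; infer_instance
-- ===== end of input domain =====

-- B uppercases every other letter via a precomputed letter-position index and a
-- membership-driven single mapping pass, instead of A's live parity counter. (idiomatic)

-- string.ascii_letters
def asciiLetters : List Char :=
  "abcdefghijklmnopqrstuvwxyzABCDEFGHIJKLMNOPQRSTUVWXYZ".toList

-- ===== PORT A =====
-- the body of A's for-loop: (ch1, j) is the state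
def majStep (st : List Char × Int) (c : Char) : List Char × Int :=
  if !(asciiLetters.contains c) then (st.1 ++ [c], st.2)
  else if PySem.Int.mod st.2 2 == 0 then (st.1 ++ [PySem.Chars.upperChar c], st.2 + 1)
  else (st.1 ++ [c], st.2 + 1)

def maj (ch0 : String) : String :=
  String.ofList (ch0.toList.foldl majStep ([], 0)).1

-- ===== PORT B =====
def maj_alt (ch0 : String) : String :=
  let cs := ch0.toList
  let positions : List Int :=
    ((PySem.List.enumerate cs).filter (fun p => asciiLetters.contains p.2)).map (·.1)
  let toUpper : PySem.Set Int :=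
    PySem.Set.ofList
      (((PySem.List.enumerate positions).filter (fun q => PySem.Int.mod q.1 2 == 0)).map (·.2))
  String.ofList ((PySem.List.enumerate cs).map
    (fun p => if PySem.Set.contains toUpper p.1 then PySem.Chars.upperChar p.2 else p.2))

-- ===== PRECONDITION & SPEC =====
def Spec_maj (ch0 : String) (out : String) : Prop := out = maj_alt ch0
instance (ch0 : String) (out : String) : Decidable (Spec_maj ch0 out) := by unfold Spec_maj; infer_instance

-- ===== CLAIM (what is proved, stated in full; the proofs are below) =====
def Claim_equal_maj : Prop := ∀ (ch0 : String), Dom_maj ch0 → Spec_maj ch0 (maj ch0)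

-- ===== LEMMAS AND PROOFS =====

-- reference: alternate on letters; b = "the next letter gets uppercased"
def refMaj : Bool → List Char → List Char
  | _, [] => []
  | b, c :: t =>
    if asciiLetters.contains c then
      (if b then PySem.Chars.upperChar c else c) :: refMaj (!b) t
    else c :: refMaj b t

-- every other element, starting with the first when b = true
def eo : Bool → List Int → List Int
  | _, [] => []
  | true, a :: t => a :: eo false t
  | false, _ :: t => eo true t

-- the letter positions of t, indices starting at n
def lidxF (n : Int) (t : List Char) : List Int :=
  ((PySem.List.enumerate t n).filter (fun p => asciiLetters.contains p.2)).map (·.1)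

lemma modeq (j : Int) : PySem.Int.mod j 2 = j % 2 := by
  unfold PySem.Int.mod; exact Int.fmod_eq_emod_of_nonneg j (by norm_num)

lemma foldA (t : List Char) : ∀ (acc : List Char) (j : Int),
    (t.foldl majStep (acc, j)).1 = acc ++ refMaj (PySem.Int.mod j 2 == 0) t := by
  induction t with
  | nil => intro acc j; simp [refMaj]
  | cons c t ih =>
    intro acc j
    rw [List.foldl_cons]
    by_cases hc : asciiLetters.contains c
    · rcases Int.emod_two_eq j with h | h
      · have hj : (PySem.Int.mod j 2 == 0) = true := by rw [modeq, h]; rfl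
        have hj1 : (PySem.Int.mod (j + 1) 2 == 0) = false := by
          rw [modeq]; have : (j + 1) % 2 = 1 := by omega
          rw [this]; rfl
        have e1 : majStep (acc, j) c = (acc ++ [PySem.Chars.upperChar c], j + 1) := by
          unfold majStep; rw [hc, hj]; rfl
        have hc' : c ∈ asciiLetters := by simpa using hc
        rw [e1, ih, hj1, hj]
        simp [refMaj, hc']
      · have hj : (PySem.Int.mod j 2 == 0) = false := by rw [modeq, h]; rfl
        have hj1 : (PySem.Int.mod (j + 1) 2 == 0) = true := by
          rw [modeq]; have : (j + 1) % 2 = 0 := by omega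
          rw [this]; rfl
        have e1 : majStep (acc, j) c = (acc ++ [c], j + 1) := by
          unfold majStep; rw [hc, hj]; rfl
        have hc' : c ∈ asciiLetters := by simpa using hc
        rw [e1, ih, hj1, hj]
        simp [refMaj, hc']
    · have e1 : majStep (acc, j) c = (acc ++ [c], j) := by
        unfold majStep; rw [show asciiLetters.contains c = false by simpa using hc]; rfl
      have hc' : c ∉ asciiLetters := by simpa using hc
      rw [e1, ih]
      simp [refMaj, hc']

lemma lidxF_cons (n : Int) (c : Char) (t : List Char) :
    lidxF n (c :: t) =
      if asciiLetters.contains c then n :: lidxF (n + 1) t else lidxF (n + 1) t := by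
  by_cases hc : c ∈ asciiLetters <;>
    simp [lidxF, PySem.List.enumerate_cons, List.filter_cons, hc]

lemma lidxF_ge (t : List Char) : ∀ (n m : Int), m ∈ lidxF n t → n ≤ m := by
  induction t with
  | nil => intro n m h; simp [lidxF] at h
  | cons c t ih =>
    intro n m h
    rw [lidxF_cons] at h
    by_cases hc : asciiLetters.contains c
    · simp only [hc, if_true, List.mem_cons] at h
      rcases h with h | h
      · omega
      · have := ih (n + 1) m h; omega
    · simp only [hc, Bool.false_eq_true, if_false] at h
      have := ih (n + 1) m h; omega

lemma eo_subset (xs : List Int) : ∀ (b : Bool) (m : Int), m ∈ eo b xs → m ∈ xs := by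
  induction xs with
  | nil => intro b m h; cases b <;> simp [eo] at h
  | cons a t ih =>
    intro b m h
    cases b with
    | true =>
      simp only [eo, List.mem_cons] at h
      rcases h with h | h
      · simp [h]
      · exact List.mem_cons_of_mem _ (ih false m h)
    | false =>
      simp only [eo] at h
      exact List.mem_cons_of_mem _ (ih true m h)

lemma evens_eq_eo (xs : List Int) : ∀ (k : Int),
    (((PySem.List.enumerate xs k).filter (fun q => PySem.Int.mod q.1 2 == 0)).map (·.2))
      = eo (PySem.Int.mod k 2 == 0) xs := by
  induction xs with
  | nil => intro k; simp [PySem.List.enumerate_nil, eo]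
  | cons a t ih =>
    intro k
    rcases Int.emod_two_eq k with h | h
    · have hk : (PySem.Int.mod k 2 == 0) = true := by rw [modeq, h]; rfl
      have hk1 : (PySem.Int.mod (k + 1) 2 == 0) = false := by
        rw [modeq]; have : (k + 1) % 2 = 1 := by omega
        rw [this]; rfl
      rw [PySem.List.enumerate_cons, List.filter_cons]
      simp only [hk, if_true, List.map_cons, ih, hk1, eo]
    · have hk : (PySem.Int.mod k 2 == 0) = false := by rw [modeq, h]; rfl
      have hk1 : (PySem.Int.mod (k + 1) 2 == 0) = true := by
        rw [modeq]; have : (k + 1) % 2 = 0 := by omega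
        rw [this]; rfl
      rw [PySem.List.enumerate_cons, List.filter_cons]
      simp only [hk, Bool.false_eq_true, if_false, ih, hk1, eo]

lemma contains_ofList_eq (xs : List Int) (i : Int) :
    (PySem.Set.ofList xs).contains i = xs.contains i := by
  by_cases h : i ∈ xs
  · simp [PySem.Set.contains_eq_listContains, List.contains_eq_mem, PySem.Set.mem_ofList, h]
  · simp [PySem.Set.contains_eq_listContains, List.contains_eq_mem, PySem.Set.mem_ofList, h]

lemma mapM (t : List Char) : ∀ (n : Int) (b : Bool),
    (PySem.List.enumerate t n).map
        (fun p => if (eo b (lidxF n t)).contains p.1 then PySem.Chars.upperChar p.2 else p.2)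
      = refMaj b t := by
  induction t with
  | nil => intro n b; simp [PySem.List.enumerate_nil, refMaj]
  | cons c t ih =>
    intro n b
    have hge : ∀ m ∈ lidxF (n + 1) t, n + 1 ≤ m := lidxF_ge t (n + 1)
    have hidx : ∀ p ∈ PySem.List.enumerate t (n + 1), n + 1 ≤ p.1 := by
      intro p hp
      rcases (PySem.List.mem_enumerate_iff _ _ _).1 hp with ⟨k, hk, rfl⟩
      simp
    rw [PySem.List.enumerate_cons, List.map_cons, lidxF_cons]
    by_cases hcb : asciiLetters.contains c
    · have hc' : c ∈ asciiLetters := by simpa using hcb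
      rw [if_pos hcb]
      cases b with
      | true =>
        have e : eo true (n :: lidxF (n + 1) t) = n :: eo false (lidxF (n + 1) t) := rfl
        rw [e]
        have hhead : (n :: eo false (lidxF (n + 1) t)).contains n = true := by simp
        have htail : (PySem.List.enumerate t (n + 1)).map
            (fun p => if (n :: eo false (lidxF (n + 1) t)).contains p.1
              then PySem.Chars.upperChar p.2 else p.2)
            = (PySem.List.enumerate t (n + 1)).map
            (fun p => if (eo false (lidxF (n + 1) t)).contains p.1
              then PySem.Chars.upperChar p.2 else p.2) := by
          apply List.map_congr_left
          intro p hp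
          have hne : (p.1 == n) = false := by
            have := hidx p hp
            simp only [beq_eq_false_iff_ne]
            omega
          simp only [List.contains_cons, hne, Bool.false_or]
        simp only [hhead, htail, ih (n + 1) false]
        simp [refMaj, hc']
      | false =>
        have e : eo false (n :: lidxF (n + 1) t) = eo true (lidxF (n + 1) t) := rfl
        rw [e]
        have hhead : (eo true (lidxF (n + 1) t)).contains n = false := by
          rw [List.contains_eq_mem]
          simp only [decide_eq_false_iff_not]
          intro hmem
          have := hge n (eo_subset _ true n hmem)
          omega
        simp only [hhead, ih (n + 1) true]
        simp [refMaj, hc']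
    · have hc' : c ∉ asciiLetters := by simpa using hcb
      rw [show (if asciiLetters.contains c then n :: lidxF (n + 1) t
          else lidxF (n + 1) t) = lidxF (n + 1) t from by simp [hc']]
      have hhead : (eo b (lidxF (n + 1) t)).contains n = false := by
        rw [List.contains_eq_mem]
        simp only [decide_eq_false_iff_not]
        intro hmem
        have := hge n (eo_subset _ b n hmem)
        omega
      simp only [hhead, ih (n + 1) b]
      simp [refMaj, hc']

-- ===== VERDICT (by name: the statement is the Claim_ definition above) =====
theorem maj_spec : Claim_equal_maj := by
  intro ch0 _
  show maj ch0 = maj_alt ch0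
  unfold maj maj_alt
  rw [foldA ch0.toList [] 0]
  have h0 : (PySem.Int.mod (0 : Int) 2 == 0) = true := by rw [modeq]; rfl
  rw [h0, List.nil_append]
  have hpos : ((PySem.List.enumerate ch0.toList).filter
      (fun p => asciiLetters.contains p.2)).map (·.1) = lidxF 0 ch0.toList := rfl
  simp only [hpos]
  congr 1
  rw [evens_eq_eo (lidxF 0 ch0.toList) 0, h0]
  have hc : ∀ p : Int × Char,
      (if PySem.Set.contains (PySem.Set.ofList (eo true (lidxF 0 ch0.toList))) p.1
        then PySem.Chars.upperChar p.2 else p.2)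
      = (if (eo true (lidxF 0 ch0.toList)).contains p.1
        then PySem.Chars.upperChar p.2 else p.2) := by
    intro p
    rw [show PySem.Set.contains (PySem.Set.ofList (eo true (lidxF 0 ch0.toList))) p.1
        = (eo true (lidxF 0 ch0.toList)).contains p.1 from contains_ofList_eq _ _]
  rw [List.map_congr_left (fun p _ => hc p)]
  exact (mapM ch0.toList 0 true).symm
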